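-- pv_equiv track=rewrite | github.com/Akkiam/Bigram-Model-New-name | main.py | create_bigram_map
-- ===== SOURCE A (Python) =====
-- from collections import defaultdict, Counter
--
-- def create_bigram_map(names):
--     bigram_map = defaultdict(list)
--     for name in names:
--         prev = '^'
--         for char in name:
--             bigram_map[prev].append(char)
--             prev = char
--         bigram_map[prev].append('$')
--     return bigram_map
-- ===== SOURCE B (Python) =====
-- from collections import defaultdict
--
-- def create_bigram_map(names):
--     # Stage 1: materialize the flat list of all bigram pairs across padded names.
--     pairs = []
--     for name in names:
--         padded = '^' + name + '$'
--         pairs.extend(zip(padded, padded[1:]))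
--     # Stage 2: group by key — key order is first occurrence, each bucket built by
--     # an independent filtering pass over the pair list.
--     result = defaultdict(list)
--     for key in dict.fromkeys(a for a, _ in pairs):
--         result[key] = [b for a, b in pairs if a == key]
--     return result
-- ===== Notes on version B (the rewrite author's own statement) =====
-- stated objective: alternative
-- what changed: Replaces A's single-pass dict-building loop (append into defaultdict while threading a prev-char state) with a staged group-by: first materialize the flat list of all bigram pairs of the padded names, then compute the key order via dict.fromkeys ordered dedup, then build each key's bucket with an independent filtering pass over the pair list.
import Mathlib
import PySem

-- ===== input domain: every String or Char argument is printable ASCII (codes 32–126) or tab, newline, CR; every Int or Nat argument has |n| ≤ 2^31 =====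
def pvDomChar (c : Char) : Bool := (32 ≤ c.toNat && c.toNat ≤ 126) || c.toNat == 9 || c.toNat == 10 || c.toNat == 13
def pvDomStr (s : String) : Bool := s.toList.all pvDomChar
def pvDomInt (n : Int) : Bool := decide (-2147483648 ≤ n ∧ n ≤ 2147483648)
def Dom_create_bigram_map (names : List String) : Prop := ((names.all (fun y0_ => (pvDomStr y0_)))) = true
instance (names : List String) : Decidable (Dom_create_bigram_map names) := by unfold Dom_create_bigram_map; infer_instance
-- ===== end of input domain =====

-- B replaces A's one-pass dict-append loop with a staged group-by: collect the flat bigram-pair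
-- list, dedup the first components for key order, then build each bucket by its own filter pass;
-- objective: alternative.

-- ===== PORT A =====
-- bigram_map[prev].append(char) on a defaultdict(list) = modify prev [] (· ++ [char])
def create_bigram_map (names : List String) : List (String × List String) :=
  (names.foldl
    (fun d name =>
      let st := name.toList.foldl
        (fun (st : PySem.Dict String (List String) × String) ch =>
          (st.1.modify st.2 [] (· ++ [ch.toString]), ch.toString))
        (d, "^")
      st.1.modify st.2 [] (· ++ ["$"]))
    PySem.Dict.empty).items

-- ===== PORT B =====
-- Stage 1: pairs = all adjacent pairs of each padded name; Stage 2: dict.fromkeys key order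
-- (PySem.List.dedup) and one filtering pass per key.
def create_bigram_map_alt (names : List String) : List (String × List String) :=
  let pairs : List (String × String) := names.flatMap (fun name =>
    let padded := '^' :: name.toList ++ ['$']
    (padded.zip padded.tail).map (fun pq => (pq.1.toString, pq.2.toString)))
  (PySem.List.dedup (pairs.map (·.1))).map
    (fun k => (k, (pairs.filter (fun p => p.1 == k)).map (·.2)))

-- ===== PRECONDITION & SPEC =====
def Spec_create_bigram_map (names : List String) (out : List (String × List String)) : Prop := out = create_bigram_map_alt names
instance (names : List String) (out : List (String × List String)) : Decidable (Spec_create_bigram_map names out) := by unfold Spec_create_bigram_map; infer_instance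

-- ===== CLAIM =====
def Claim_equal_create_bigram_map : Prop := ∀ (names : List String), Dom_create_bigram_map names → Spec_create_bigram_map names (create_bigram_map names)

-- ===== LEMMAS AND PROOFS =====

-- the flat list of string bigram pairs both sides reduce to
def pairsOf (names : List String) : List (String × String) :=
  names.flatMap (fun name =>
    (('^' :: name.toList).zip (name.toList ++ ['$'])).map
      (fun pq : Char × Char => (pq.1.toString, pq.2.toString)))

-- zip truncates: padding the longer first list past the second's length changes nothing
theorem zip_pad (a : Char) (l : List Char) :
    (a :: (l ++ ['$'])).zip (l ++ ['$']) = (a :: l).zip (l ++ ['$']) := by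
  induction l generalizing a with
  | nil => rfl
  | cons c cs ih => simpa [List.zip] using ih c

-- per-name: A's prev-threading inner loop (plus the final '$' append) equals a fold over the zipped pairs
theorem perName_eq (l : List Char) (prev : Char) (d : PySem.Dict String (List String)) :
    (let st := l.foldl
        (fun (st : PySem.Dict String (List String) × String) ch =>
          (st.1.modify st.2 [] (· ++ [ch.toString]), ch.toString))
        (d, prev.toString)
     st.1.modify st.2 [] (· ++ ["$"]))
    = ((prev :: l).zip (l ++ ['$'])).foldl
        (fun d (pq : Char × Char) => d.modify pq.1.toString [] (· ++ [pq.2.toString])) d := by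
  induction l generalizing prev d with
  | nil => simp [List.foldl]; rfl
  | cons c cs ih =>
    simpa [List.foldl] using ih c (d.modify prev.toString [] (· ++ [c.toString]))

-- A is the modify-append fold of the flat pair list
theorem A_eq_fold (names : List String) :
    create_bigram_map names
    = ((pairsOf names).foldl
        (fun d (p : String × String) => d.modify p.1 [] (· ++ [p.2])) PySem.Dict.empty).items := by
  unfold create_bigram_map pairsOf
  rw [List.foldl_flatMap]
  congr 1
  congr 1
  funext d name
  rw [List.foldl_map]
  exact perName_eq name.toList '^' d

-- B is the staged group-by of the same flat pair list
theorem B_eq_groupby (names : List String) :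
    create_bigram_map_alt names
    = (PySem.List.dedup ((pairsOf names).map (·.1))).map
        (fun k => (k, ((pairsOf names).filter (fun p => p.1 == k)).map (·.2))) := by
  unfold create_bigram_map_alt pairsOf
  simp only [List.cons_append, List.tail_cons, zip_pad]

-- the modify-append fold's items ARE the group-by
theorem fold_items_eq_groupby (P : List (String × String)) :
    ((P.foldl (fun d (p : String × String) => d.modify p.1 [] (· ++ [p.2])) PySem.Dict.empty).items)
    = (PySem.List.dedup (P.map (·.1))).map
        (fun k => (k, (P.filter (fun p => p.1 == k)).map (·.2))) := by
  have hnd := PySem.Dict.nodup_keys_foldl_modify_key P Prod.fst [] (fun _ p => (· ++ [p.2]))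
    PySem.Dict.empty (by simp [PySem.Dict.keys_empty])
  rw [PySem.Dict.items_eq_map_keys _ hnd []]
  have hkeys : (P.foldl (fun d (p : String × String) => d.modify p.1 [] (· ++ [p.2]))
      PySem.Dict.empty).keys = PySem.List.dedup (P.map (·.1)) := by
    rw [PySem.Dict.keys_foldl_modify_key P Prod.fst [] (fun _ p => (· ++ [p.2])) PySem.Dict.empty]
    simp [PySem.Dict.keys_empty, PySem.Set.update_nil_left, PySem.List.dedup_eq_ofList]
  rw [hkeys]
  refine List.map_congr_left (fun k _ => ?_)
  simp [PySem.Dict.getD_foldl_modify_append, PySem.Dict.getD_empty]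

-- ===== VERDICT =====
theorem create_bigram_map_spec : Claim_equal_create_bigram_map := by
  intro names _
  unfold Spec_create_bigram_map
  rw [A_eq_fold, fold_items_eq_groupby, B_eq_groupby]
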